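-- pv_equiv track=rewrite | github.com/ReiTony/AIScribe | utils/intent_detector.py | should_extract_document_info
-- ===== SOURCE A (Python) =====
-- def should_extract_document_info(message: str) -> bool:
--     """
--     Quick heuristic check if message might contain document information.
--     Used to decide if we should attempt information extraction.
--     """
--     keywords = [
--         "generate", "create", "draft", "make", "write",
--         "demand letter", "contract", "affidavit",
--         "sender", "recipient", "amount", "due"
--     ]
--     message_lower = message.lower()
--     return any(keyword in message_lower for keyword in keywords)
-- ===== SOURCE B (Python) =====
-- KEYWORDS = [
--     "generate", "create", "draft", "make", "write",
--     "demand letter", "contract", "affidavit",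
--     "sender", "recipient", "amount", "due"
-- ]
--
-- def should_extract_document_info(message: str) -> bool:
--     """Single left-to-right scan of the message: at each position, test
--     whether some keyword starts there (position-major instead of
--     keyword-major substring search)."""
--     m = message.lower()
--     return any(any(m.startswith(k, i) for k in KEYWORDS)
--                for i in range(len(m)))
-- ===== Notes on version B (the rewrite author's own statement) =====
-- stated objective: alternative
-- what changed: Replaces the keyword-major loop of independent substring-containment tests with a single position-major scan of the lowercased message that at each index tests which keyword starts there.
import Mathlib
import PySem

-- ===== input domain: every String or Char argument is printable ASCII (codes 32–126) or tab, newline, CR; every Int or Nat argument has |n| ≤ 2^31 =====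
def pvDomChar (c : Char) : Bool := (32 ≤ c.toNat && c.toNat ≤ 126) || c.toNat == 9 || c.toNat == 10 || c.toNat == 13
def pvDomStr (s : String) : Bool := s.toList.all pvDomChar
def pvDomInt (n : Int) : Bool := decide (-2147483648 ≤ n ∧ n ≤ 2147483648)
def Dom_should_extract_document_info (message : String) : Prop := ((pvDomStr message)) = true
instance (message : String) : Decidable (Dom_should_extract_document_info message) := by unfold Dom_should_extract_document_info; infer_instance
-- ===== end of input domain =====

-- B replaces A's keyword-major loop of 'in' substring searches by one
-- position-major scan of the message (objective: alternative traversal, same result).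

def pvKeywords : List String :=
  ["generate", "create", "draft", "make", "write",
   "demand letter", "contract", "affidavit",
   "sender", "recipient", "amount", "due"]

-- ===== PORT A =====
-- any(keyword in message_lower for keyword in keywords)
def should_extract_document_info (message : String) : Bool :=
  let message_lower := PySem.Str.lower message
  pvKeywords.any (fun keyword => PySem.Str.isIn keyword message_lower)

-- ===== PORT B =====
-- any(any(m.startswith(k, i) for k in KEYWORDS) for i in range(len(m)))
-- m.startswith(k, i) with 0 ≤ i < len(m) is ported by hand (exact there) as
-- Chars.startswith on the i-th tail of m.
def should_extract_document_info_alt (message : String) : Bool :=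
  let m := (PySem.Str.lower message).toList
  (List.range m.length).any (fun i =>
    pvKeywords.any (fun k => PySem.Chars.startswith (m.drop i) k.toList))

-- ===== PRECONDITION & SPEC =====
def Spec_should_extract_document_info (message : String) (out : Bool) : Prop := out = should_extract_document_info_alt message
instance (message : String) (out : Bool) : Decidable (Spec_should_extract_document_info message out) := by unfold Spec_should_extract_document_info; infer_instance

-- ===== CLAIM (what is proved, stated in full; the proofs are below) =====
def Claim_equal_should_extract_document_info : Prop := ∀ (message : String), Dom_should_extract_document_info message → Spec_should_extract_document_info message (should_extract_document_info message)

-- ===== LEMMAS AND PROOFS =====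

-- For a nonempty pattern, scanning every position of m for a prefix match is
-- the same as substring containment.
theorem pv_scan_eq_isIn (m k : List Char) (hk : k ≠ []) :
    ((List.range m.length).any (fun i => PySem.Chars.startswith (m.drop i) k))
      = PySem.Chars.isIn k m := by
  rw [Bool.eq_iff_iff]
  simp only [List.any_eq_true, List.mem_range, PySem.Chars.startswith_iff]
  constructor
  · rintro ⟨i, _, hp⟩
    exact (PySem.Chars.exists_prefix_drop_iff_isIn k m).mp ⟨i, hp⟩
  · intro h
    obtain ⟨j, hp⟩ := (PySem.Chars.exists_prefix_drop_iff_isIn k m).mpr h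
    refine ⟨j, ?_, hp⟩
    by_contra hj
    have : m.drop j = [] := List.drop_eq_nil_of_le (by omega)
    rw [this, List.prefix_nil] at hp
    exact hk hp

-- ===== VERDICT (by name: the statement is the Claim_ definition above) =====
theorem should_extract_document_info_spec : Claim_equal_should_extract_document_info := by
  intro message _
  unfold Spec_should_extract_document_info should_extract_document_info should_extract_document_info_alt
  rw [Bool.eq_iff_iff]
  constructor
  · intro h
    rw [List.any_eq_true] at h ⊢
    obtain ⟨k, hkmem, hin⟩ := h
    have hk : k.toList ≠ [] := by
      simp only [pvKeywords, List.mem_cons, List.not_mem_nil, or_false] at hkmem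
      rcases hkmem with rfl|rfl|rfl|rfl|rfl|rfl|rfl|rfl|rfl|rfl|rfl|rfl <;> decide
    rw [PySem.Str.isIn_eq, ← pv_scan_eq_isIn _ _ hk, List.any_eq_true] at hin
    obtain ⟨i, hi, hp⟩ := hin
    exact ⟨i, hi, List.any_eq_true.mpr ⟨k, hkmem, hp⟩⟩
  · intro h
    rw [List.any_eq_true] at h ⊢
    obtain ⟨i, hi, hany⟩ := h
    rw [List.any_eq_true] at hany
    obtain ⟨k, hkmem, hp⟩ := hany
    refine ⟨k, hkmem, ?_⟩
    have hk : k.toList ≠ [] := by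
      simp only [pvKeywords, List.mem_cons, List.not_mem_nil, or_false] at hkmem
      rcases hkmem with rfl|rfl|rfl|rfl|rfl|rfl|rfl|rfl|rfl|rfl|rfl|rfl <;> decide
    rw [PySem.Str.isIn_eq, ← pv_scan_eq_isIn _ _ hk, List.any_eq_true]
    exact ⟨i, hi, hp⟩
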